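-- pv_equiv track=rewrite | github.com/t2ance/ProteinCompound | scripts/resolve_unmatched_sequences.py | _pick_best_ncbi
-- ===== SOURCE A (Python) =====
-- from typing import Dict, List, Optional, Tuple
--
-- def _pick_best_ncbi(records: List[Tuple[str, str]]) -> Optional[Tuple[str, str]]:
--     if not records:
--         return None
--     def rank(acc: str) -> int:
--         if acc.startswith("NP_"):
--             return 0
--         if acc.startswith("XP_"):
--             return 1
--         return 2
--     best = None
--     for acc, seq in records:
--         if not seq:
--             continue
--         if best is None:
--             best = (acc, seq)
--             continue
--         if rank(acc) < rank(best[0]):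
--             best = (acc, seq)
--         elif rank(acc) == rank(best[0]) and len(seq) > len(best[1]):
--             best = (acc, seq)
--     return best
-- ===== SOURCE B (Python) =====
-- from typing import List, Optional, Tuple
--
-- def _pick_best_ncbi(records: List[Tuple[str, str]]) -> Optional[Tuple[str, str]]:
--     np_bucket, xp_bucket, other_bucket = [], [], []
--     for acc, seq in records:
--         if not seq:
--             continue
--         if acc.startswith("NP_"):
--             np_bucket.append((acc, seq))
--         elif acc.startswith("XP_"):
--             xp_bucket.append((acc, seq))
--         else:
--             other_bucket.append((acc, seq))
--     for bucket in (np_bucket, xp_bucket, other_bucket):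
--         if bucket:
--             return max(bucket, key=lambda r: len(r[1]))
--     return None
-- ===== Notes on version B (the rewrite author's own statement) =====
-- stated objective: alternative
-- what changed: Instead of A's single best-so-far scan comparing (rank, length) pairs, B partitions the non-empty records into three rank buckets in one pass and then returns the longest-sequence record (earliest on ties) of the first non-empty bucket.
import Mathlib
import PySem

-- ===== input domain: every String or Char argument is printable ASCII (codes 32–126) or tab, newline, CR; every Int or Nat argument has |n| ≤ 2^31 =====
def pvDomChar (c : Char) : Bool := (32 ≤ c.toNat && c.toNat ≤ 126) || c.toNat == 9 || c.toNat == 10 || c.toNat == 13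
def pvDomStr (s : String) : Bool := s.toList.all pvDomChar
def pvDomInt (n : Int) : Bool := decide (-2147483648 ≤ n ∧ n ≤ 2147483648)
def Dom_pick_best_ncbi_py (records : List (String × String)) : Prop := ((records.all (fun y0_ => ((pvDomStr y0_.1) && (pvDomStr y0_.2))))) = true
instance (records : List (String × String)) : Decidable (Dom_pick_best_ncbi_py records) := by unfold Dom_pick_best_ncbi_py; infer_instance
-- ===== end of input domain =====

-- B replaces A's single best-so-far scan by a bucket partition on prefix rank followed by a
-- longest-sequence selection in the first non-empty bucket (alternative decomposition, same cost).

-- ===== PORT A =====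
-- rank helper of A ('def rank(acc)')
def pvRank (acc : String) : Int :=
  if PySem.Str.startswith acc "NP_" then 0
  else if PySem.Str.startswith acc "XP_" then 1
  else 2

def pick_best_ncbi_py (records : List (String × String)) : Option (String × String) :=
  if records = [] then none
  else
    records.foldl
      (fun best r =>
        if r.2 = "" then best
        else
          match best with
          | none => some r
          | some b =>
            if pvRank r.1 < pvRank b.1 then some r
            else if pvRank r.1 = pvRank b.1 ∧ PySem.Str.len r.2 > PySem.Str.len b.2 then some r
            else some b)
      none

-- ===== PORT B =====
def pick_best_ncbi_py_alt (records : List (String × String)) : Option (String × String) :=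
  let buckets :=
    records.foldl
      (fun (b : List (String × String) × List (String × String) × List (String × String)) r =>
        if r.2 = "" then b
        else if PySem.Str.startswith r.1 "NP_" then (b.1 ++ [r], b.2.1, b.2.2)
        else if PySem.Str.startswith r.1 "XP_" then (b.1, b.2.1 ++ [r], b.2.2)
        else (b.1, b.2.1, b.2.2 ++ [r]))
      ([], [], [])
  if buckets.1 ≠ [] then PySem.List.max? buckets.1 (fun r => PySem.Str.len r.2)
  else if buckets.2.1 ≠ [] then PySem.List.max? buckets.2.1 (fun r => PySem.Str.len r.2)
  else if buckets.2.2 ≠ [] then PySem.List.max? buckets.2.2 (fun r => PySem.Str.len r.2)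
  else none

-- ===== PRECONDITION & SPEC =====
def Spec_pick_best_ncbi_py (records : List (String × String)) (out : Option (String × String)) : Prop := out = pick_best_ncbi_py_alt records
instance (records : List (String × String)) (out : Option (String × String)) : Decidable (Spec_pick_best_ncbi_py records out) := by unfold Spec_pick_best_ncbi_py; infer_instance

-- ===== CLAIM (what is proved, stated in full; the proofs are below) =====
def Claim_equal_pick_best_ncbi_py : Prop := ∀ (records : List (String × String)), Dom_pick_best_ncbi_py records → Spec_pick_best_ncbi_py records (pick_best_ncbi_py records)

-- ===== LEMMAS AND PROOFS =====

-- key projections and loop bodies of the two ports, named for the proofs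
def pvRk (r : String × String) : Int := pvRank r.1
def pvLn (r : String × String) : Int := PySem.Str.len r.2
def pvNe (r : String × String) : Bool := !(r.2 == "")
def pvB0 (r : String × String) : Bool := PySem.Str.startswith r.1 "NP_"
def pvB1 (r : String × String) : Bool := !pvB0 r && PySem.Str.startswith r.1 "XP_"
def pvB2 (r : String × String) : Bool := !pvB0 r && !(PySem.Str.startswith r.1 "XP_")
def pvQ0 (r : String × String) : Bool := pvNe r && pvB0 r
def pvQ1 (r : String × String) : Bool := pvNe r && pvB1 r
def pvQ2 (r : String × String) : Bool := pvNe r && pvB2 r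

abbrev pvBet (x m : String × String) : Prop := pvRk x < pvRk m ∨ (pvRk x = pvRk m ∧ pvLn m < pvLn x)
def pvSel (m x : String × String) : String × String := if pvBet x m then x else m
def pvMxSel (m x : String × String) : String × String := if pvLn m < pvLn x then x else m

def pvStepA (best : Option (String × String)) (r : String × String) : Option (String × String) :=
  if r.2 = "" then best
  else
    match best with
    | none => some r
    | some b =>
      if pvRank r.1 < pvRank b.1 then some r
      else if pvRank r.1 = pvRank b.1 ∧ PySem.Str.len r.2 > PySem.Str.len b.2 then some r
      else some b

def pvStepBk (b : List (String × String) × List (String × String) × List (String × String))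
    (r : String × String) : List (String × String) × List (String × String) × List (String × String) :=
  if r.2 = "" then b
  else if PySem.Str.startswith r.1 "NP_" then (b.1 ++ [r], b.2.1, b.2.2)
  else if PySem.Str.startswith r.1 "XP_" then (b.1, b.2.1 ++ [r], b.2.2)
  else (b.1, b.2.1, b.2.2 ++ [r])

def pvG : List (String × String) → Option (String × String)
  | [] => none
  | x :: t => some (t.foldl pvSel x)

def pvCmb (x : String × String) : Option (String × String) → String × String
  | none => x
  | some n => if pvBet n x then n else x

def pvSel3 (f0 f1 f2 : List (String × String)) : Option (String × String) :=
  if f0 ≠ [] then PySem.List.max? f0 pvLn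
  else if f1 ≠ [] then PySem.List.max? f1 pvLn
  else if f2 ≠ [] then PySem.List.max? f2 pvLn
  else none

theorem pv_portA_eq (records : List (String × String)) :
    pick_best_ncbi_py records = if records = [] then none else records.foldl pvStepA none := rfl

theorem pv_portB_eq (records : List (String × String)) :
    pick_best_ncbi_py_alt records =
      pvSel3 (records.foldl pvStepBk ([], [], [])).1
             (records.foldl pvStepBk ([], [], [])).2.1
             (records.foldl pvStepBk ([], [], [])).2.2 := rfl

-- the B-side fold builds exactly the three filtered lists
theorem pv_buckets_eq : ∀ (l : List (String × String)) (a b c : List (String × String)),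
    l.foldl pvStepBk (a, b, c) = (a ++ l.filter pvQ0, b ++ l.filter pvQ1, c ++ l.filter pvQ2) := by
  intro l
  induction l with
  | nil => intro a b c; simp
  | cons r t ih =>
    intro a b c
    rw [List.foldl_cons]
    by_cases he : r.2 = ""
    · have hne : pvNe r = false := by simp [pvNe, he]
      simp only [pvStepBk, if_pos he]
      rw [ih, List.filter_cons_of_neg (by simp [pvQ0, hne]),
          List.filter_cons_of_neg (by simp [pvQ1, hne]),
          List.filter_cons_of_neg (by simp [pvQ2, hne])]
    · have hne : pvNe r = true := by simp [pvNe, he]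
      simp only [pvStepBk, if_neg he]
      by_cases h0 : PySem.Str.startswith r.1 "NP_" = true
      · rw [if_pos h0, ih,
            List.filter_cons_of_pos (by simp only [pvQ0, pvB0, hne, h0, Bool.and_self]),
            List.filter_cons_of_neg (by simp only [pvQ1, pvB1, pvB0, hne, h0, Bool.not_true,
              Bool.false_and, Bool.and_false]; decide),
            List.filter_cons_of_neg (by simp only [pvQ2, pvB2, pvB0, hne, h0, Bool.not_true,
              Bool.false_and, Bool.and_false]; decide)]
        simp
      · have h0' : PySem.Str.startswith r.1 "NP_" = false := by simpa using h0
        rw [if_neg h0]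
        by_cases h1 : PySem.Str.startswith r.1 "XP_" = true
        · rw [if_pos h1, ih,
              List.filter_cons_of_neg (by simp only [pvQ0, pvB0, hne, h0', Bool.true_and]; decide),
              List.filter_cons_of_pos (by simp only [pvQ1, pvB1, pvB0, hne, h0', h1,
                Bool.not_false, Bool.and_self]),
              List.filter_cons_of_neg (by simp only [pvQ2, pvB2, pvB0, hne, h0', h1,
                Bool.not_false, Bool.not_true, Bool.and_false]; decide)]
          simp
        · have h1' : PySem.Str.startswith r.1 "XP_" = false := by simpa using h1
          rw [if_neg h1, ih,
              List.filter_cons_of_neg (by simp only [pvQ0, pvB0, hne, h0', Bool.true_and]; decide),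
              List.filter_cons_of_neg (by simp only [pvQ1, pvB1, pvB0, hne, h0', h1',
                Bool.not_false, Bool.and_false]; decide),
              List.filter_cons_of_pos (by simp only [pvQ2, pvB2, pvB0, hne, h0', h1',
                Bool.not_false, Bool.and_self])]
          simp

-- A's fold skips empty sequences …
theorem pv_stepA_skip (b : Option (String × String)) (r : String × String) (h : r.2 = "") :
    pvStepA b r = b := by
  unfold pvStepA; rw [if_pos h]

theorem pv_foldA_filter : ∀ (l : List (String × String)) (acc : Option (String × String)),
    l.foldl pvStepA acc = (l.filter pvNe).foldl pvStepA acc := by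
  intro l
  induction l with
  | nil => intro acc; rfl
  | cons r t ih =>
    intro acc
    by_cases h : r.2 = ""
    · rw [List.filter_cons_of_neg (by simp [pvNe, h]), List.foldl_cons, pv_stepA_skip _ _ h, ih]
    · rw [List.filter_cons_of_pos (by simp [pvNe, h]), List.foldl_cons, List.foldl_cons, ih]

-- … and on a non-empty record its step is the strict lexicographic selection pvSel
theorem pv_stepA_some (b r : String × String) (h : ¬ r.2 = "") :
    pvStepA (some b) r = some (pvSel b r) := by
  simp only [pvStepA, pvSel, pvBet, pvRk, pvLn, if_neg h]
  split_ifs <;> (try rfl) <;> omega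

theorem pv_foldA_G : ∀ (t : List (String × String)) (x : String × String),
    (∀ y ∈ t, pvNe y = true) → t.foldl pvStepA (some x) = some (t.foldl pvSel x) := by
  intro t
  induction t with
  | nil => intro x _; rfl
  | cons y s ih =>
    intro x h
    have hy : ¬ y.2 = "" := by have := h y (by simp); simpa [pvNe] using this
    rw [List.foldl_cons, pv_stepA_some x y hy, List.foldl_cons]
    exact ih _ (fun z hz => h z (by simp [hz]))

theorem pv_A_eq_G (m : List (String × String)) (h : ∀ y ∈ m, pvNe y = true) :
    m.foldl pvStepA none = pvG m := by
  cases m with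
  | nil => rfl
  | cons x t =>
    have hx : ¬ x.2 = "" := by have := h x (by simp); simpa [pvNe] using this
    have h1 : pvStepA none x = some x := by unfold pvStepA; rw [if_neg hx]
    rw [List.foldl_cons, h1, pvG]
    exact pv_foldA_G t x (fun y hy => h y (by simp [hy]))

-- folding pvSel from a seed x is combining x with the leftmost optimum of the rest
theorem pv_fold_cmb : ∀ (t : List (String × String)) (x : String × String),
    t.foldl pvSel x = pvCmb x (pvG t) := by
  intro t
  induction t with
  | nil => intro x; rfl
  | cons y s ih =>
    intro x
    rw [List.foldl_cons, ih (pvSel x y), pvG,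
        show pvCmb x (some (s.foldl pvSel y)) = pvCmb x (some (pvCmb y (pvG s))) by rw [ih y]]
    cases hg : pvG s with
    | none => simp only [pvCmb, pvSel]
    | some n =>
      simp only [pvCmb, pvSel, pvBet]
      split_ifs
      all_goals try rfl
      all_goals omega

-- a later record displaces x only when strictly better
theorem pv_cmb_hi (x n : String × String) (h : pvRk x < pvRk n) : pvCmb x (some n) = x := by
  simp only [pvCmb]; rw [if_neg (by simp only [pvBet]; omega)]

theorem pv_cmb_lo (x n : String × String) (h : pvRk n < pvRk x) : pvCmb x (some n) = n := by
  simp only [pvCmb]; rw [if_pos (by simp only [pvBet]; omega)]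

-- within one rank bucket pvSel degenerates to the longest-sequence selection
theorem pv_fold_sel_mx : ∀ (s : List (String × String)) (x : String × String) (c : Int),
    (∀ y ∈ s, pvRk y = c) → pvRk x = c → s.foldl pvSel x = s.foldl pvMxSel x := by
  intro s
  induction s with
  | nil => intro x c _ _; rfl
  | cons y t ih =>
    intro x c hs hx
    have hy : pvRk y = c := hs y (by simp)
    have h1 : pvSel x y = pvMxSel x y := by
      simp only [pvSel, pvMxSel, pvBet]; split_ifs <;> (try rfl) <;> omega
    have h2 : pvRk (pvMxSel x y) = c := by
      unfold pvMxSel; split_ifs <;> assumption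
    rw [List.foldl_cons, List.foldl_cons, h1]
    exact ih _ c (fun z hz => hs z (by simp [hz])) h2

theorem pv_fold_mx_rk : ∀ (s : List (String × String)) (x : String × String) (c : Int),
    (∀ y ∈ s, pvRk y = c) → pvRk x = c → pvRk (s.foldl pvMxSel x) = c := by
  intro s
  induction s with
  | nil => intro x c _ hx; exact hx
  | cons y t ih =>
    intro x c hs hx
    have h2 : pvRk (pvMxSel x y) = c := by
      unfold pvMxSel; split_ifs
      · exact hs y (by simp)
      · exact hx
    rw [List.foldl_cons]
    exact ih _ c (fun z hz => hs z (by simp [hz])) h2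

theorem pv_max?_cons2 (x y : String × String) (t : List (String × String)) :
    PySem.List.max? (x :: y :: t) pvLn = PySem.List.max? (pvMxSel x y :: t) pvLn := by
  unfold PySem.List.max?
  simp only [List.foldl_cons]
  congr 1
  unfold pvMxSel
  split_ifs <;> rfl

theorem pv_mx_cons (x : String × String) (t : List (String × String)) :
    PySem.List.max? (x :: t) pvLn = some (t.foldl pvMxSel x) := by
  induction t generalizing x with
  | nil => rfl
  | cons y s ih => rw [pv_max?_cons2, ih (pvMxSel x y), List.foldl_cons]

-- the longest record of a non-empty uniform-rank bucket is its leftmost optimum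
theorem pv_G_eq_mx (f : List (String × String)) (c : Int)
    (h : ∀ y ∈ f, pvRk y = c) (hne : f ≠ []) :
    PySem.List.max? f pvLn = pvG f := by
  cases f with
  | nil => exact absurd rfl hne
  | cons z s =>
    rw [pv_mx_cons, pvG, pv_fold_sel_mx s z c (fun y hy => h y (by simp [hy])) (h z (by simp))]

theorem pv_mx_rk (f : List (String × String)) (c : Int)
    (h : ∀ y ∈ f, pvRk y = c) (hne : f ≠ []) :
    ∃ n, PySem.List.max? f pvLn = some n ∧ pvRk n = c := by
  cases f with
  | nil => exact absurd rfl hne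
  | cons z s =>
    exact ⟨_, pv_mx_cons z s, pv_fold_mx_rk s z c (fun y hy => h y (by simp [hy])) (h z (by simp))⟩

-- rank of the members of each bucket
theorem pv_rk_b0 (r : String × String) (h : pvB0 r = true) : pvRk r = 0 := by
  simp only [pvB0] at h; simp only [pvRk, pvRank, h]; rfl
theorem pv_rk_b1 (r : String × String) (h : pvB1 r = true) : pvRk r = 1 := by
  simp only [pvB1, pvB0, Bool.and_eq_true, Bool.not_eq_true'] at h
  simp only [pvRk, pvRank, h.1, h.2]; rfl
theorem pv_rk_b2 (r : String × String) (h : pvB2 r = true) : pvRk r = 2 := by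
  simp only [pvB2, pvB0, Bool.and_eq_true, Bool.not_eq_true'] at h
  simp only [pvRk, pvRank, h.1, h.2]; rfl

-- a record of a lower-ranked x is never displaced by the later buckets
theorem pv_cmb_sel3_hi (x : String × String) (f1 f2 : List (String × String)) (c1 c2 : Int)
    (h1 : ∀ y ∈ f1, pvRk y = c1) (h2 : ∀ y ∈ f2, pvRk y = c2)
    (hx1 : pvRk x < c1) (hx2 : pvRk x < c2) :
    pvCmb x (pvSel3 [] f1 f2) = x := by
  unfold pvSel3
  rw [if_neg (by simp)]
  by_cases hf1 : f1 = []
  · rw [if_neg (by simp [hf1])]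
    by_cases hf2 : f2 = []
    · rw [if_neg (by simp [hf2])]; rfl
    · rw [if_pos hf2]
      obtain ⟨n, hn, hrk⟩ := pv_mx_rk f2 c2 h2 hf2
      rw [hn]; exact pv_cmb_hi x n (by omega)
  · rw [if_pos hf1]
    obtain ⟨n, hn, hrk⟩ := pv_mx_rk f1 c1 h1 hf1
    rw [hn]; exact pv_cmb_hi x n (by omega)

theorem pv_sel3_fst (f0 f1 f2 : List (String × String)) (h : f0 ≠ []) :
    pvSel3 f0 f1 f2 = PySem.List.max? f0 pvLn := by
  unfold pvSel3; rw [if_pos h]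

theorem pv_sel3_snd (f1 f2 : List (String × String)) (h : f1 ≠ []) :
    pvSel3 [] f1 f2 = PySem.List.max? f1 pvLn := by
  unfold pvSel3; rw [if_neg (by simp), if_pos h]

theorem pv_sel3_thd (f2 : List (String × String)) (h : f2 ≠ []) :
    pvSel3 [] [] f2 = PySem.List.max? f2 pvLn := by
  unfold pvSel3; rw [if_neg (by simp), if_neg (by simp), if_pos h]

-- CORE: the leftmost (rank, -len) optimum is the longest record of the first non-empty bucket
theorem pv_G_sel3 : ∀ (m : List (String × String)),
    pvG m = pvSel3 (m.filter pvB0) (m.filter pvB1) (m.filter pvB2) := by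
  intro m
  induction m with
  | nil => rfl
  | cons x t ih =>
    have hG : pvG (x :: t) = some (pvCmb x (pvG t)) := by rw [pvG, pv_fold_cmb]
    have hm0 : ∀ y ∈ t.filter pvB0, pvRk y = 0 := fun y hy => pv_rk_b0 y (List.of_mem_filter hy)
    have hm1 : ∀ y ∈ t.filter pvB1, pvRk y = 1 := fun y hy => pv_rk_b1 y (List.of_mem_filter hy)
    have hm2 : ∀ y ∈ t.filter pvB2, pvRk y = 2 := fun y hy => pv_rk_b2 y (List.of_mem_filter hy)
    rw [hG, ih]
    by_cases h0 : pvB0 x = true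
    · have h0' : pvB0 x = true := h0
      have hb1 : pvB1 x = false := by
        simp only [pvB1, h0, Bool.not_true, Bool.false_and]
      have hb2 : pvB2 x = false := by
        simp only [pvB2, h0, Bool.not_true, Bool.false_and]
      have hx0 : pvRk x = 0 := pv_rk_b0 x h0
      rw [List.filter_cons_of_pos h0, List.filter_cons_of_neg (by simp [hb1]),
          List.filter_cons_of_neg (by simp [hb2]),
          pv_sel3_fst _ _ _ (List.cons_ne_nil _ _), pv_mx_cons,
          ← pv_fold_sel_mx (t.filter pvB0) x 0 hm0 hx0, pv_fold_cmb]
      refine congrArg some ?_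
      by_cases hf0 : t.filter pvB0 = []
      · rw [hf0]
        exact pv_cmb_sel3_hi x _ _ 1 2 hm1 hm2 (by omega) (by omega)
      · rw [pv_sel3_fst _ _ _ hf0, pv_G_eq_mx (t.filter pvB0) 0 hm0 hf0]
    · have h0' : pvB0 x = false := by simpa using h0
      rw [List.filter_cons_of_neg (by simp [h0'])]
      by_cases h1 : PySem.Str.startswith x.1 "XP_" = true
      · have hb1 : pvB1 x = true := by
          simp only [pvB1, h0', h1, Bool.not_false, Bool.true_and]
        have hb2 : pvB2 x = false := by
          simp only [pvB2, h0', h1, Bool.not_false, Bool.not_true, Bool.and_false]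
        have hx1 : pvRk x = 1 := pv_rk_b1 x hb1
        rw [List.filter_cons_of_pos hb1, List.filter_cons_of_neg (by simp [hb2])]
        by_cases hf0 : t.filter pvB0 = []
        · rw [hf0, pv_sel3_snd _ _ (List.cons_ne_nil _ _), pv_mx_cons,
              ← pv_fold_sel_mx (t.filter pvB1) x 1 hm1 hx1, pv_fold_cmb]
          refine congrArg some ?_
          by_cases hf1 : t.filter pvB1 = []
          · rw [hf1]
            exact pv_cmb_sel3_hi x _ _ 2 2 (by simp) hm2 (by omega) (by omega)
          · rw [pv_sel3_snd _ _ hf1, pv_G_eq_mx (t.filter pvB1) 1 hm1 hf1]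
        · obtain ⟨n, hn, hrk⟩ := pv_mx_rk (t.filter pvB0) 0 hm0 hf0
          rw [pv_sel3_fst _ _ _ hf0, pv_sel3_fst _ _ _ hf0, hn]
          exact congrArg some (pv_cmb_lo x n (by omega))
      · have h1' : PySem.Str.startswith x.1 "XP_" = false := by simpa using h1
        have hb1 : pvB1 x = false := by
          simp only [pvB1, h0', h1', Bool.not_false, Bool.true_and]
        have hb2 : pvB2 x = true := by
          simp only [pvB2, h0', h1', Bool.not_false, Bool.and_self]
        have hx2 : pvRk x = 2 := pv_rk_b2 x hb2
        rw [List.filter_cons_of_neg (by simp [hb1]), List.filter_cons_of_pos hb2]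
        by_cases hf0 : t.filter pvB0 = []
        · by_cases hf1 : t.filter pvB1 = []
          · rw [hf0, hf1, pv_sel3_thd _ (List.cons_ne_nil _ _), pv_mx_cons,
                ← pv_fold_sel_mx (t.filter pvB2) x 2 hm2 hx2, pv_fold_cmb]
            refine congrArg some ?_
            by_cases hf2 : t.filter pvB2 = []
            · rw [hf2]; rfl
            · rw [pv_sel3_thd _ hf2, pv_G_eq_mx (t.filter pvB2) 2 hm2 hf2]
          · obtain ⟨n, hn, hrk⟩ := pv_mx_rk (t.filter pvB1) 1 hm1 hf1
            rw [hf0, pv_sel3_snd _ _ hf1, pv_sel3_snd _ _ hf1, hn]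
            exact congrArg some (pv_cmb_lo x n (by omega))
        · obtain ⟨n, hn, hrk⟩ := pv_mx_rk (t.filter pvB0) 0 hm0 hf0
          rw [pv_sel3_fst _ _ _ hf0, pv_sel3_fst _ _ _ hf0, hn]
          exact congrArg some (pv_cmb_lo x n (by omega))

-- composing the non-empty filter with a rank filter gives the bucket predicates
theorem pv_filter_filter (b : (String × String) → Bool) :
    ∀ (l : List (String × String)),
      (l.filter pvNe).filter b = l.filter (fun r => pvNe r && b r) := by
  intro l
  induction l with
  | nil => rfl
  | cons r t ih =>
    by_cases hn : pvNe r = true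
    · by_cases hb : b r = true
      · rw [List.filter_cons_of_pos hn, List.filter_cons_of_pos hb,
            List.filter_cons_of_pos (by simp [hn, hb]), ih]
      · rw [List.filter_cons_of_pos hn, List.filter_cons_of_neg hb,
            List.filter_cons_of_neg (by simp [hn, hb]), ih]
    · rw [List.filter_cons_of_neg hn, List.filter_cons_of_neg (by simp [hn]), ih]

-- ===== VERDICT (by name: the statement is the Claim_ definition above) =====
theorem pick_best_ncbi_py_spec : Claim_equal_pick_best_ncbi_py := by
  intro records _
  unfold Spec_pick_best_ncbi_py
  rw [pv_portA_eq, pv_portB_eq, pv_buckets_eq]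
  simp only [List.nil_append]
  by_cases h : records = []
  · subst h; rfl
  · rw [if_neg h, pv_foldA_filter,
        pv_A_eq_G _ (fun y hy => List.of_mem_filter hy), pv_G_sel3,
        pv_filter_filter pvB0, pv_filter_filter pvB1, pv_filter_filter pvB2]
    rfl
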